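-- pv_equiv track=rewrite | github.com/SauravSinha76/scaler | class76/repeting_sequence.py | solve
-- ===== SOURCE A (Python) =====
-- def solve(A):
--     n = len(A)
--     def lsc(i,j,dp):
--         if i == len(A) or j == len(A):
--             return 0
--         if dp[i][j] != -1:
--             return dp[i][j]
--         if i != j and A[i] == A[j]:
--             dp[i][j] = 1 + lsc(i+1,j+1,dp)
--         else:
--             dp[i][j] = max(lsc(i+1,j,dp), lsc(i,j+1,dp))
--         return dp[i][j]
--     dp = [[-1 for _ in range(n+1)]
--           for _ in range(n+1)]
--     return 1 if lsc(0,0,dp) > 1 else 0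
-- ===== SOURCE B (Python) =====
-- def solve(A):
--     # Iterative bottom-up DP over two rows instead of A's memoized recursion.
--     n = len(A)
--     prev = [0] * (n + 1)
--     for i in range(n - 1, -1, -1):
--         cur = [0]
--         for j in range(n - 1, -1, -1):
--             if i != j and A[i] == A[j]:
--                 cur.insert(0, 1 + prev[j + 1])
--             else:
--                 cur.insert(0, max(prev[j], cur[0]))
--         prev = cur
--     return 1 if prev[0] > 1 else 0
-- ===== Notes on version B (the rewrite author's own statement) =====
-- stated objective: alternative
-- what changed: A fills the DP table by top-down memoized recursion over a preallocated (n+1)x(n+1) table; B computes the same recurrence iteratively bottom-up, building each row from the next and keeping only two rows (O(n) extra space, no recursion).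
import Mathlib
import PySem

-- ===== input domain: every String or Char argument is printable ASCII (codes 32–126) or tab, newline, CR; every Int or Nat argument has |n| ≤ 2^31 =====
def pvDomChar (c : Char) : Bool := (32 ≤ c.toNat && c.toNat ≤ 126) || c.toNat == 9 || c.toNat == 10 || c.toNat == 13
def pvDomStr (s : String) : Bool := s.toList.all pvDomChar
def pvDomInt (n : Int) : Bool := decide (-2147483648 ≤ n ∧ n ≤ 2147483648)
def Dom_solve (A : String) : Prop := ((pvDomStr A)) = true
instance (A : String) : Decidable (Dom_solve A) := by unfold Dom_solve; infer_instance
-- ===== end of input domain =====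

-- B replaces A's top-down memoized recursion by an iterative bottom-up DP keeping only two rows
-- (objective: alternative decomposition; also avoids Python's recursion-depth overhead).

-- ===== PORT A =====
-- dp[i][j] read/write; Python always indexes in range, so getD/set are exact here.
def pvGet2 (dp : List (List Int)) (i j : Nat) : Int := (dp.getD i []).getD j (-1)

def pvSet2 (dp : List (List Int)) (i j : Nat) (v : Int) : List (List Int) :=
  dp.set i ((dp.getD i []).set j v)

-- the inner memoized recursion `lsc`; `fuel` only makes it total (every in-domain call
-- from `solve` has i,j ≤ |s| and fuel > 2*|s| - i - j, so fuel never runs out).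
-- `A[i] == A[j]` is exact via getD since i,j < len(A) whenever this branch is reached.
def pvLsc (s : List Char) (fuel : Nat) (i j : Nat) (dp : List (List Int)) :
    Int × List (List Int) :=
  match fuel with
  | 0 => (0, dp)
  | fuel + 1 =>
    if i = s.length ∨ j = s.length then (0, dp)
    else if pvGet2 dp i j ≠ -1 then (pvGet2 dp i j, dp)
    else if i ≠ j ∧ s.getD i ' ' = s.getD j ' ' then
      let r := pvLsc s fuel (i+1) (j+1) dp
      let dp' := pvSet2 r.2 i j (1 + r.1)
      (pvGet2 dp' i j, dp')
    else
      let r1 := pvLsc s fuel (i+1) j dp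
      let r2 := pvLsc s fuel i (j+1) r1.2
      let dp' := pvSet2 r2.2 i j (max r1.1 r2.1)
      (pvGet2 dp' i j, dp')

def solve (A : String) : Int :=
  let s := A.toList
  let n := s.length
  let dp := List.replicate (n+1) (List.replicate (n+1) (-1 : Int))
  if (pvLsc s (2*n+2) 0 0 dp).1 > 1 then 1 else 0

-- ===== PORT B =====
-- inner loop: j runs n-1, …, 0; `cur` is built by prepending (Python's cur.insert(0, …)).
def pvRowGo (s : List Char) (prev : List Int) (i : Nat) : Nat → List Int → List Int
  | 0, cur => cur
  | j + 1, cur =>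
    let e := if i ≠ j ∧ s.getD i ' ' = s.getD j ' ' then 1 + prev.getD (j+1) 0
             else max (prev.getD j 0) (cur.headD 0)
    pvRowGo s prev i j (e :: cur)

-- outer loop: i runs n-1, …, 0; `k` is the number of rows still to build.
def pvRows (s : List Char) : Nat → List Int → List Int
  | 0, prev => prev
  | k + 1, prev => pvRows s k (pvRowGo s prev k s.length [0])

def solve_alt (A : String) : Int :=
  if (pvRows A.toList A.toList.length
      (List.replicate (A.toList.length + 1) (0 : Int))).getD 0 0 > 1 then 1 else 0

-- ===== PRECONDITION & SPEC =====
def Spec_solve (A : String) (out : Int) : Prop := out = solve_alt A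
instance (A : String) (out : Int) : Decidable (Spec_solve A out) := by unfold Spec_solve; infer_instance

-- ===== CLAIM (what is proved, stated in full; the proofs are below) =====
def Claim_equal_solve : Prop := ∀ (A : String), Dom_solve A → Spec_solve A (solve A)

-- ===== LEMMAS AND PROOFS =====

-- the mathematical recurrence both programs compute
def pvSpec (s : List Char) (i j : Nat) : Int :=
  if s.length ≤ i ∨ s.length ≤ j then 0
  else if i ≠ j ∧ s.getD i ' ' = s.getD j ' ' then 1 + pvSpec s (i+1) (j+1)
  else max (pvSpec s (i+1) j) (pvSpec s i (j+1))
termination_by (s.length - i) + (s.length - j)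
decreasing_by all_goals omega

def pvInv (s : List Char) (dp : List (List Int)) : Prop :=
  dp.length = s.length + 1 ∧ (∀ r ∈ dp, r.length = s.length + 1) ∧
  ∀ i j, i ≤ s.length → j ≤ s.length →
    pvGet2 dp i j = -1 ∨ pvGet2 dp i j = pvSpec s i j

theorem pvGet2_set_self (dp : List (List Int)) (i j : Nat) (v : Int)
    (hi : i < dp.length) (hj : j < (dp.getD i []).length) :
    pvGet2 (pvSet2 dp i j v) i j = v := by
  have hj2 : j < dp[i].length := by
    simpa [List.getD, List.getElem?_eq_getElem hi] using hj
  simp [pvGet2, pvSet2, List.getD, List.getElem?_set, hi, hj2]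

theorem pvGet2_set_ne (dp : List (List Int)) (i j i' j' : Nat) (v : Int)
    (h : ¬(i' = i ∧ j' = j)) :
    pvGet2 (pvSet2 dp i j v) i' j' = pvGet2 dp i' j' := by
  by_cases hi : i' = i
  · subst hi
    have hj : j' ≠ j := fun hj => h ⟨rfl, hj⟩
    by_cases hlen : i' < dp.length
    · simp [pvGet2, pvSet2, List.getD, List.getElem?_set, hlen,
        List.getElem?_eq_getElem, hj.symm]
    · simp [pvGet2, pvSet2, List.set_eq_of_length_le (by omega : dp.length ≤ i')]
  · simp [pvGet2, pvSet2, List.getD, List.getElem?_set, Ne.symm hi]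

theorem pvInv_set (s : List Char) (dp : List (List Int)) (i j : Nat)
    (hinv : pvInv s dp) (hi : i ≤ s.length) (hj : j ≤ s.length) :
    pvInv s (pvSet2 dp i j (pvSpec s i j)) ∧
    pvGet2 (pvSet2 dp i j (pvSpec s i j)) i j = pvSpec s i j := by
  obtain ⟨hlen, hrow, hmem⟩ := hinv
  have hi' : i < dp.length := by omega
  have hrowlen : (dp.getD i []).length = s.length + 1 := by
    have : dp.getD i [] ∈ dp := by
      rw [List.getD, List.getElem?_eq_getElem hi']
      exact List.getElem_mem hi'
    exact hrow _ this
  have hself := pvGet2_set_self dp i j (pvSpec s i j) hi' (by omega)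
  refine ⟨⟨?_, ?_, ?_⟩, hself⟩
  · simp [pvSet2, hlen]
  · intro r hr
    rcases List.mem_or_eq_of_mem_set hr with h | h
    · exact hrow _ h
    · subst h
      simp only [List.length_set]
      simpa [List.getD] using hrowlen
  · intro i' j' hi'' hj''
    by_cases he : i' = i ∧ j' = j
    · obtain ⟨rfl, rfl⟩ := he
      right; exact hself
    · rw [pvGet2_set_ne dp i j i' j' _ he]
      exact hmem i' j' hi'' hj''

theorem pvLsc_correct (s : List Char) (fuel : Nat) :
    ∀ i j dp, pvInv s dp → i ≤ s.length → j ≤ s.length →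
      2 * s.length - i - j < fuel →
      (pvLsc s fuel i j dp).1 = pvSpec s i j ∧ pvInv s (pvLsc s fuel i j dp).2 := by
  induction fuel with
  | zero => intro i j dp _ _ _ hf; omega
  | succ fuel ih =>
    intro i j dp hinv hi hj hf
    rw [pvLsc]
    by_cases hend : i = s.length ∨ j = s.length
    · have h0 : pvSpec s i j = 0 := by
        rw [pvSpec]; simp [show s.length ≤ i ∨ s.length ≤ j by omega]
      rw [if_pos hend]
      exact ⟨h0.symm, hinv⟩
    · push_neg at hend
      have hi' : i < s.length := by omega
      have hj' : j < s.length := by omega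
      simp only [if_neg (by tauto : ¬(i = s.length ∨ j = s.length))]
      by_cases hmemo : pvGet2 dp i j ≠ -1
      · rcases hinv.2.2 i j hi hj with h | h
        · exact absurd h hmemo
        · rw [if_pos hmemo]
          exact ⟨h, hinv⟩
      · rw [if_neg hmemo]
        by_cases hd : i ≠ j ∧ s.getD i ' ' = s.getD j ' '
        · rw [if_pos hd]
          obtain ⟨hv, hinv'⟩ := ih (i+1) (j+1) dp hinv (by omega) (by omega) (by omega)
          have hspec : pvSpec s i j = 1 + pvSpec s (i+1) (j+1) := by
            rw [pvSpec, if_neg (by omega), if_pos hd]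
          simp only [hv, ← hspec]
          have h2 := pvInv_set s _ i j hinv' hi hj
          exact ⟨h2.2, h2.1⟩
        · rw [if_neg hd]
          obtain ⟨hv1, hinv1⟩ := ih (i+1) j dp hinv (by omega) hj (by omega)
          obtain ⟨hv2, hinv2⟩ := ih i (j+1) _ hinv1 hi (by omega) (by omega)
          have hspec : pvSpec s i j = max (pvSpec s (i+1) j) (pvSpec s i (j+1)) := by
            rw [pvSpec, if_neg (by omega), if_neg hd]
          simp only [hv1, hv2, ← hspec]
          have h2 := pvInv_set s _ i j hinv2 hi hj
          exact ⟨h2.2, h2.1⟩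

theorem pvInv_init (s : List Char) :
    pvInv s (List.replicate (s.length+1) (List.replicate (s.length+1) (-1 : Int))) := by
  refine ⟨by simp, ?_, ?_⟩
  · intro r hr
    rw [List.eq_of_mem_replicate hr]; simp
  · intro i j hi hj
    left
    simp [pvGet2, List.getD, List.getElem?_replicate, show i < s.length + 1 by omega,
      show j < s.length + 1 by omega]

theorem solve_eq_spec (A : String) :
    solve A = if pvSpec A.toList 0 0 > 1 then 1 else 0 := by
  have h := pvLsc_correct A.toList (2 * A.toList.length + 2) 0 0 _
    (pvInv_init A.toList) (by omega) (by omega) (by omega)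
  simp only [solve, h.1]

-- row i of the spec table, entries j, j+1, …, n
def pvRowTail (s : List Char) (i j : Nat) : List Int :=
  (List.range' j (s.length + 1 - j)).map (pvSpec s i)

theorem pvRowTail_getD (s : List Char) (i t : Nat) (hj : t ≤ s.length) :
    (pvRowTail s i 0).getD t 0 = pvSpec s i t := by
  simp [pvRowTail, List.getD, List.getElem?_range', Nat.lt_succ_iff, hj]

theorem pvRowGo_correct (s : List Char) (i : Nat) (hi : i < s.length) :
    ∀ j, j ≤ s.length →
      pvRowGo s (pvRowTail s (i+1) 0) i j (pvRowTail s i j) = pvRowTail s i 0 := by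
  intro j
  induction j with
  | zero => intro _; rw [pvRowGo]
  | succ j ih =>
    intro hj
    rw [pvRowGo]
    have hjn : j < s.length := by omega
    have hhead : (pvRowTail s i (j+1)).headD 0 = pvSpec s i (j+1) := by
      have : s.length + 1 - (j+1) = (s.length - (j+1)) + 1 := by omega
      simp [pvRowTail, this, List.range'_succ]
    have he : (if i ≠ j ∧ s.getD i ' ' = s.getD j ' ' then 1 + (pvRowTail s (i+1) 0).getD (j+1) 0
        else max ((pvRowTail s (i+1) 0).getD j 0) ((pvRowTail s i (j+1)).headD 0))
        = pvSpec s i j := by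
      have hu : pvSpec s i j = if i ≠ j ∧ s.getD i ' ' = s.getD j ' ' then
          1 + pvSpec s (i+1) (j+1) else max (pvSpec s (i+1) j) (pvSpec s i (j+1)) := by
        rw [pvSpec, if_neg (by omega)]
      rw [pvRowTail_getD s (i+1) (j+1) (by omega), pvRowTail_getD s (i+1) j (by omega),
        hhead, hu]
    have hcons : pvSpec s i j :: pvRowTail s i (j+1) = pvRowTail s i j := by
      have h1 : s.length + 1 - j = (s.length + 1 - (j+1)) + 1 := by omega
      simp [pvRowTail, h1, List.range'_succ]
    simp only [he, hcons, ih (by omega)]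

theorem pvRows_correct (s : List Char) :
    ∀ k, k ≤ s.length → pvRows s k (pvRowTail s k 0) = pvRowTail s 0 0 := by
  intro k
  induction k with
  | zero => intro _; rw [pvRows]
  | succ k ih =>
    intro hk
    rw [pvRows]
    have hrow : pvRowGo s (pvRowTail s (k+1) 0) k s.length [0] = pvRowTail s k 0 := by
      have htail : pvRowTail s k s.length = [0] := by
        have h1 : s.length + 1 - s.length = 1 := by omega
        have h2 : pvSpec s k s.length = 0 := by rw [pvSpec]; simp
        simp [pvRowTail, h1, h2]
      rw [← htail]
      exact pvRowGo_correct s k (by omega) s.length le_rfl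
    rw [hrow]
    exact ih (by omega)

theorem pvRowTail_last (s : List Char) :
    pvRowTail s s.length 0 = List.replicate (s.length + 1) (0 : Int) := by
  rw [List.eq_replicate_iff]
  constructor
  · simp [pvRowTail]
  · intro b hb
    simp only [pvRowTail, List.mem_map] at hb
    obtain ⟨j, _, hj⟩ := hb
    rw [← hj, pvSpec]; simp

theorem solve_alt_eq_spec (A : String) :
    solve_alt A = if pvSpec A.toList 0 0 > 1 then 1 else 0 := by
  unfold solve_alt
  rw [← pvRowTail_last A.toList, pvRows_correct A.toList A.toList.length le_rfl,
    pvRowTail_getD A.toList 0 0 (Nat.zero_le _)]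

-- ===== VERDICT (by name: the statement is the Claim_ definition above) =====
theorem solve_spec : Claim_equal_solve := by
  intro A _
  unfold Spec_solve
  rw [solve_eq_spec, solve_alt_eq_spec]
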